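-- pv_equiv track=rewrite | github.com/Veronica-L/Fixseeker_main | hunk_relation.py | line_hunk_map
-- ===== SOURCE A (Python) =====
-- def line_hunk_map(hunkInfo, paths, a_or_b):
--     a_flow_tps = []
--     if len(paths) > 0:
--         if a_or_b in paths.keys():
--             for flow_tp in paths[a_or_b]:
--                 lineno_from, lineno_to, type = flow_tp[0], flow_tp[1], flow_tp[2]
--                 index_from = index_to = 0
--                 for index, hunk in enumerate(hunkInfo):
--                     if hunk[0].startswith(f'/{a_or_b}/') and lineno_from >= hunk[1] and lineno_from <= hunk[2]:
--                         index_from = index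
--                     if hunk[0].startswith(f'/{a_or_b}/') and lineno_to >= hunk[1] and lineno_to <= hunk[2]:
--                         index_to = index
--                 if index_from == index_to: continue
--                 if (index_from, index_to, type) not in a_flow_tps:
--                     a_flow_tps.append((index_from, index_to, type))
--     return a_flow_tps
-- ===== SOURCE B (Python) =====
-- def line_hunk_map(hunkInfo, paths, a_or_b):
--     out = []
--     if len(paths) == 0 or a_or_b not in paths:
--         return out
--     prefix = '/' + a_or_b + '/'
--     # one-time table of path-matching hunks, newest first (last match wins)
--     matched = [(i, h[1], h[2]) for i, h in enumerate(hunkInfo) if h[0].startswith(prefix)]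
--     matched.reverse()
--     cache = {}
--
--     def lookup(line):
--         if line not in cache:
--             idx = 0
--             for i, lo, hi in matched:
--                 if lo <= line <= hi:
--                     idx = i
--                     break
--             cache[line] = idx
--         return cache[line]
--
--     seen = set()
--     for lineno_from, lineno_to, type in paths[a_or_b]:
--         index_from = lookup(lineno_from)
--         index_to = lookup(lineno_to)
--         if index_from == index_to:
--             continue
--         key = (index_from, index_to, type)
--         if key not in seen:
--             seen.add(key)
--             out.append(key)
--     return out
-- ===== Notes on version B (the rewrite author's own statement) =====
-- stated objective: faster
-- what changed: A rescans every hunk (two startswith tests per hunk) for every flow pair and dedupes by scanning the output list; B builds the path-matching hunk table once, memoises line-number-to-hunk-index lookups in a dict, and dedupes with a set, so repeated lines and the output-list scans disappear.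
import Mathlib
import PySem

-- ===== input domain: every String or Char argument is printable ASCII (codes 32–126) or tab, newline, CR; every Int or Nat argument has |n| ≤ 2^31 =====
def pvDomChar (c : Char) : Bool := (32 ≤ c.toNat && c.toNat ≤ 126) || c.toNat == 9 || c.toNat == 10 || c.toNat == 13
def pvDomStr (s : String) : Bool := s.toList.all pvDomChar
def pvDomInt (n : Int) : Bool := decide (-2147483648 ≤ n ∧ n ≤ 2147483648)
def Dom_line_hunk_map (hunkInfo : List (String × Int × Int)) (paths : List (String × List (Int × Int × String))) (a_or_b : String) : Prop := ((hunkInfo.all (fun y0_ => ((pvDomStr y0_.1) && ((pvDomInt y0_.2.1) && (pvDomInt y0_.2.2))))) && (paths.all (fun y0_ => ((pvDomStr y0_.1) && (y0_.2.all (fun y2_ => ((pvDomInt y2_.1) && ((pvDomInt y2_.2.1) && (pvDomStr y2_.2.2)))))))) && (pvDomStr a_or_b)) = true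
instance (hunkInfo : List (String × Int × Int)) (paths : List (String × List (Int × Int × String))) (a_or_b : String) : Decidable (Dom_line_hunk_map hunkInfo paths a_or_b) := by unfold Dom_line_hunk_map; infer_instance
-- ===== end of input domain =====

-- B replaces A's per-flow rescan of all hunks (with two startswith tests per hunk per flow) by a
-- one-time table of path-matching hunks plus a memo dict of line→hunk-index lookups; same return value.

-- ===== PORT A =====
def line_hunk_map (hunkInfo : List (String × Int × Int)) (paths : List (String × List (Int × Int × String))) (a_or_b : String) : List (Int × Int × String) :=
  if paths.length > 0 then
    match (PySem.Dict.mk paths).get? a_or_b with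
    | some flows =>
      flows.foldl (fun acc flow =>
        let lineno_from := flow.1
        let lineno_to := flow.2.1
        let ty := flow.2.2
        -- index_from = index_to = 0; for index, hunk in enumerate(hunkInfo): two conditional updates
        let p := (PySem.List.enumerate hunkInfo 0).foldl (fun (q : Int × Int) ih =>
          let q1 := if PySem.Str.startswith ih.2.1 ("/" ++ a_or_b ++ "/") && decide (lineno_from ≥ ih.2.2.1) && decide (lineno_from ≤ ih.2.2.2) then (ih.1, q.2) else q
          if PySem.Str.startswith ih.2.1 ("/" ++ a_or_b ++ "/") && decide (lineno_to ≥ ih.2.2.1) && decide (lineno_to ≤ ih.2.2.2) then (q1.1, ih.1) else q1) (0, 0)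
        if p.1 = p.2 then acc
        else if (p.1, p.2, ty) ∈ acc then acc
        else acc ++ [(p.1, p.2, ty)]) []
    | none => []
  else []

-- ===== PORT B =====
-- loop with break over the reversed matched-hunk table (Source B's `lookup` inner loop)
def pvLookupAux (matched : List (Int × Int × Int)) (line : Int) : Int :=
  match matched with
  | [] => 0
  | m :: rest => if m.2.1 ≤ line ∧ line ≤ m.2.2 then m.1 else pvLookupAux rest line

-- Source B's memoised lookup: consult the cache, otherwise scan the table and record the answer
def pvLookup (matched : List (Int × Int × Int)) (cache : PySem.Dict Int Int) (line : Int) : Int × PySem.Dict Int Int :=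
  match cache.get? line with
  | some v => (v, cache)
  | none => (pvLookupAux matched line, cache.insert line (pvLookupAux matched line))

def line_hunk_map_alt (hunkInfo : List (String × Int × Int)) (paths : List (String × List (Int × Int × String))) (a_or_b : String) : List (Int × Int × String) :=
  if paths.length = 0 then []
  else match (PySem.Dict.mk paths).get? a_or_b with
  | none => []
  | some flows =>
    let pre := "/" ++ a_or_b ++ "/"
    let matched := (((PySem.List.enumerate hunkInfo 0).filter
        (fun ih => PySem.Str.startswith ih.2.1 pre)).map
        (fun ih => (ih.1, ih.2.2.1, ih.2.2.2))).reverse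
    (flows.foldl (fun (st : List (Int × Int × String) × PySem.Dict Int Int × PySem.Set (Int × Int × String)) flow =>
      let r1 := pvLookup matched st.2.1 flow.1
      let r2 := pvLookup matched r1.2 flow.2.1
      if r1.1 = r2.1 then (st.1, r2.2, st.2.2)
      else if PySem.Set.contains st.2.2 (r1.1, r2.1, flow.2.2) then (st.1, r2.2, st.2.2)
      else (st.1 ++ [(r1.1, r2.1, flow.2.2)], r2.2, PySem.Set.add st.2.2 (r1.1, r2.1, flow.2.2)))
      ([], PySem.Dict.empty, PySem.Set.empty)).1

-- ===== PRECONDITION & SPEC =====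
def Spec_line_hunk_map (hunkInfo : List (String × Int × Int)) (paths : List (String × List (Int × Int × String))) (a_or_b : String) (out : List (Int × Int × String)) : Prop := out = line_hunk_map_alt hunkInfo paths a_or_b
instance (hunkInfo : List (String × Int × Int)) (paths : List (String × List (Int × Int × String))) (a_or_b : String) (out : List (Int × Int × String)) : Decidable (Spec_line_hunk_map hunkInfo paths a_or_b out) := by unfold Spec_line_hunk_map; infer_instance

-- ===== CLAIM (what is proved, stated in full; the proofs are below) =====
def Claim_equal_line_hunk_map : Prop := ∀ (hunkInfo : List (String × Int × Int)) (paths : List (String × List (Int × Int × String))) (a_or_b : String), Dom_line_hunk_map hunkInfo paths a_or_b → Spec_line_hunk_map hunkInfo paths a_or_b (line_hunk_map hunkInfo paths a_or_b)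

-- ===== LEMMAS AND PROOFS =====

-- A's last-match fold over one line equals first match in the reversed list
theorem pv_lastFold_eq_find {α : Type} (c : (Int × α) → Bool) :
    ∀ (es : List (Int × α)) (init : Int),
      es.foldl (fun a ih => if c ih then ih.1 else a) init
        = (match es.reverse.find? c with | some p => p.1 | none => init) := by
  intro es
  induction es with
  | nil => intro init; simp
  | cons e es ih =>
    intro init
    simp only [List.foldl_cons, List.reverse_cons, List.find?_append]
    rw [ih]
    cases h : es.reverse.find? c with
    | some p => simp
    | none =>
      simp only [Option.or_none, List.find?_cons, List.find?_nil]
      by_cases hc : c e = true <;> simp [hc]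

-- pvLookupAux is first match in the list
theorem pvLookupAux_eq_find (matched : List (Int × Int × Int)) (line : Int) :
    pvLookupAux matched line
      = (match matched.find? (fun m => decide (m.2.1 ≤ line ∧ line ≤ m.2.2)) with
         | some m => m.1 | none => 0) := by
  induction matched with
  | nil => simp [pvLookupAux]
  | cons m rest ih =>
    simp only [pvLookupAux, List.find?_cons]
    by_cases h : (m.2.1 ≤ line ∧ line ≤ m.2.2) <;> simp [h, ih]

-- B's table lookup computes exactly A's last-match fold for that line
theorem pv_lookupAux_eq_lastFold (hunkInfo : List (String × Int × Int)) (a_or_b : String) (line : Int) :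
    pvLookupAux ((((PySem.List.enumerate hunkInfo 0).filter
        (fun ih => PySem.Str.startswith ih.2.1 ("/" ++ a_or_b ++ "/"))).map
        (fun ih => (ih.1, ih.2.2.1, ih.2.2.2))).reverse) line
      = (PySem.List.enumerate hunkInfo 0).foldl (fun a ih =>
          if PySem.Str.startswith ih.2.1 ("/" ++ a_or_b ++ "/") && decide (line ≥ ih.2.2.1) && decide (line ≤ ih.2.2.2)
          then ih.1 else a) 0 := by
  rw [pvLookupAux_eq_find, pv_lastFold_eq_find, ← List.map_reverse, ← List.filter_reverse,
      List.find?_map, List.find?_filter]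
  have hpred : (fun a => decide ((fun ih => PySem.Str.startswith ih.2.1 ("/" ++ a_or_b ++ "/")) a = true ∧
        ((fun m => decide (m.2.1 ≤ line ∧ line ≤ m.2.2)) ∘ fun ih => (ih.1, ih.2.2.1, ih.2.2.2)) a = true))
      = (fun (ih : Int × String × Int × Int) =>
          PySem.Str.startswith ih.2.1 ("/" ++ a_or_b ++ "/") && decide (line ≥ ih.2.2.1) && decide (line ≤ ih.2.2.2)) := by
    funext ih
    simp [ge_iff_le, Bool.and_assoc, and_assoc]
  rw [hpred]
  cases h : (PySem.List.enumerate hunkInfo 0).reverse.find? _ with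
  | some p => simp
  | none => simp

-- cache invariant: every cached value is the table lookup
def pvCacheOk (matched : List (Int × Int × Int)) (cache : PySem.Dict Int Int) : Prop :=
  ∀ l v, cache.get? l = some v → v = pvLookupAux matched l

theorem pvLookup_fst (matched : List (Int × Int × Int)) (cache : PySem.Dict Int Int) (line : Int)
    (h : pvCacheOk matched cache) : (pvLookup matched cache line).1 = pvLookupAux matched line := by
  unfold pvLookup
  cases hg : cache.get? line with
  | some v => simpa using (h line v hg)
  | none => simp

theorem pvLookup_snd (matched : List (Int × Int × Int)) (cache : PySem.Dict Int Int) (line : Int)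
    (h : pvCacheOk matched cache) : pvCacheOk matched (pvLookup matched cache line).2 := by
  unfold pvLookup
  cases hg : cache.get? line with
  | some v => simpa using h
  | none =>
    intro l v hv
    simp only [PySem.Dict.get?_insert] at hv
    split at hv
    · rename_i heq; subst heq; simpa using hv.symm
    · exact h l v hv

-- A's per-flow pair fold decomposes into two independent single-line folds
theorem pv_pairfold {α : Type} (c1 c2 : α → Bool) (g : α → Int) :
    ∀ (es : List α) (x y : Int),
      es.foldl (fun (q : Int × Int) e =>
        let q1 := if c1 e then (g e, q.2) else q
        if c2 e then (q1.1, g e) else q1) (x, y)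
      = (es.foldl (fun a e => if c1 e then g e else a) x,
         es.foldl (fun a e => if c2 e then g e else a) y) := by
  intro es
  induction es with
  | nil => intro x y; rfl
  | cons e es ihe =>
    intro x y
    simp only [List.foldl_cons]
    cases h1 : c1 e <;> cases h2 : c2 e <;> simp [h1, h2, ihe]

-- Set.contains on the output list is list membership
theorem pv_contains_iff (s : List (Int × Int × String)) (x : Int × Int × String) :
    PySem.Set.contains s x = true ↔ x ∈ s := by
  simp [PySem.Set.contains]

-- the main loop: B's fold (output, cache, seen) tracks A's fold, with seen = output
theorem pv_fold_eq (hunkInfo : List (String × Int × Int)) (a_or_b : String)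
    (matched : List (Int × Int × Int))
    (hm : matched = (((PySem.List.enumerate hunkInfo 0).filter
        (fun ih => PySem.Str.startswith ih.2.1 ("/" ++ a_or_b ++ "/"))).map
        (fun ih => (ih.1, ih.2.2.1, ih.2.2.2))).reverse) :
    ∀ (flows : List (Int × Int × String)) (out : List (Int × Int × String))
      (cache : PySem.Dict Int Int) (hc : pvCacheOk matched cache),
      (flows.foldl (fun (st : List (Int × Int × String) × PySem.Dict Int Int × PySem.Set (Int × Int × String)) flow =>
        let r1 := pvLookup matched st.2.1 flow.1
        let r2 := pvLookup matched r1.2 flow.2.1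
        if r1.1 = r2.1 then (st.1, r2.2, st.2.2)
        else if PySem.Set.contains st.2.2 (r1.1, r2.1, flow.2.2) then (st.1, r2.2, st.2.2)
        else (st.1 ++ [(r1.1, r2.1, flow.2.2)], r2.2, PySem.Set.add st.2.2 (r1.1, r2.1, flow.2.2)))
        (out, cache, out)).1
      = flows.foldl (fun acc flow =>
          let p := (PySem.List.enumerate hunkInfo 0).foldl (fun (q : Int × Int) ih =>
            let q1 := if PySem.Str.startswith ih.2.1 ("/" ++ a_or_b ++ "/") && decide (flow.1 ≥ ih.2.2.1) && decide (flow.1 ≤ ih.2.2.2) then (ih.1, q.2) else q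
            if PySem.Str.startswith ih.2.1 ("/" ++ a_or_b ++ "/") && decide (flow.2.1 ≥ ih.2.2.1) && decide (flow.2.1 ≤ ih.2.2.2) then (q1.1, ih.1) else q1) (0, 0)
          if p.1 = p.2 then acc
          else if (p.1, p.2, flow.2.2) ∈ acc then acc
          else acc ++ [(p.1, p.2, flow.2.2)]) out := by
  intro flows
  induction flows with
  | nil => intro out cache _; simp
  | cons flow flows ih =>
    intro out cache hc
    simp only [List.foldl_cons]
    have hpair := pv_pairfold
      (fun ihh : Int × String × Int × Int => PySem.Str.startswith ihh.2.1 ("/" ++ a_or_b ++ "/") && decide (flow.1 ≥ ihh.2.2.1) && decide (flow.1 ≤ ihh.2.2.2))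
      (fun ihh : Int × String × Int × Int => PySem.Str.startswith ihh.2.1 ("/" ++ a_or_b ++ "/") && decide (flow.2.1 ≥ ihh.2.2.1) && decide (flow.2.1 ≤ ihh.2.2.2))
      (fun ihh => ihh.1) (PySem.List.enumerate hunkInfo 0)
    have hl1 : (pvLookup matched cache flow.1).1
        = (PySem.List.enumerate hunkInfo 0).foldl (fun a ihh =>
            if PySem.Str.startswith ihh.2.1 ("/" ++ a_or_b ++ "/") && decide (flow.1 ≥ ihh.2.2.1) && decide (flow.1 ≤ ihh.2.2.2) then ihh.1 else a) 0 := by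
      rw [pvLookup_fst matched cache flow.1 hc, hm, pv_lookupAux_eq_lastFold]
    have hc1 : pvCacheOk matched (pvLookup matched cache flow.1).2 := pvLookup_snd matched cache flow.1 hc
    have hl2 : (pvLookup matched (pvLookup matched cache flow.1).2 flow.2.1).1
        = (PySem.List.enumerate hunkInfo 0).foldl (fun a ihh =>
            if PySem.Str.startswith ihh.2.1 ("/" ++ a_or_b ++ "/") && decide (flow.2.1 ≥ ihh.2.2.1) && decide (flow.2.1 ≤ ihh.2.2.2) then ihh.1 else a) 0 := by
      rw [pvLookup_fst matched _ flow.2.1 hc1, hm, pv_lookupAux_eq_lastFold]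
    have hc2 : pvCacheOk matched (pvLookup matched (pvLookup matched cache flow.1).2 flow.2.1).2 :=
      pvLookup_snd matched _ flow.2.1 hc1
    simp only [hpair]
    by_cases heq : (pvLookup matched cache flow.1).1 = (pvLookup matched (pvLookup matched cache flow.1).2 flow.2.1).1
    · rw [if_pos heq]
      rw [hl1, hl2] at heq
      rw [if_pos heq]
      exact ih out _ hc2
    · rw [if_neg heq]
      have heq' := heq; rw [hl1, hl2] at heq'
      rw [if_neg heq']
      by_cases hmem : ((pvLookup matched cache flow.1).1, (pvLookup matched (pvLookup matched cache flow.1).2 flow.2.1).1, flow.2.2) ∈ out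
      · rw [if_pos ((pv_contains_iff out _).mpr hmem)]
        have hmem' := hmem; rw [hl1, hl2] at hmem'
        rw [if_pos hmem']
        exact ih out _ hc2
      · rw [if_neg (fun h => hmem ((pv_contains_iff out _).mp h))]
        have hmem' := hmem; rw [hl1, hl2] at hmem'
        rw [if_neg hmem']
        have hadd : PySem.Set.add out ((pvLookup matched cache flow.1).1, (pvLookup matched (pvLookup matched cache flow.1).2 flow.2.1).1, flow.2.2)
            = out ++ [((pvLookup matched cache flow.1).1, (pvLookup matched (pvLookup matched cache flow.1).2 flow.2.1).1, flow.2.2)] := by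
          simp [PySem.Set.add, PySem.Set.contains, hmem]
        rw [hadd, hl1, hl2]
        exact ih _ _ hc2

-- ===== VERDICT (by name: the statement is the Claim_ definition above) =====
theorem line_hunk_map_spec : Claim_equal_line_hunk_map := by
  intro hunkInfo paths a_or_b _
  unfold Spec_line_hunk_map line_hunk_map line_hunk_map_alt
  by_cases hp : paths.length = 0
  · simp [hp]
  · have hlen : paths.length > 0 := Nat.pos_of_ne_zero hp
    rw [if_pos hlen, if_neg hp]
    cases hget : (PySem.Dict.mk paths).get? a_or_b with
    | none => simp
    | some flows =>
      exact (pv_fold_eq hunkInfo a_or_b _ rfl flows [] PySem.Dict.empty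
        (by intro l v h; simp [PySem.Dict.get?, PySem.Dict.empty] at h)).symm
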